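-- pv_equiv track=rewrite | github.com/namel/advent-of-code-2023 | 3/a3.py | get_elements_for_line
-- ===== SOURCE A (Python) =====
-- def get_elements_for_line(l):
--     numbers = []
--     symbols = []
--     num = ""
--     num_start = None
--     for pos in range(0, len(l)):
--         if l[pos] == ".":
--             if num != "":
--                 numbers.append((int(num), num_start, pos))
--                 num_start = None
--                 num = ""
--         elif (l[pos]).isnumeric():
--             num += l[pos]
--             if num_start is None:
--                 num_start = pos
--         else:
--             if pos < len(l) - 1:
--                 symbols.append((l[pos], pos))
--             if num != "":
--                 numbers.append((int(num), num_start, pos))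
--                 num_start = None
--                 num = ""
--
--     return (numbers, symbols)
-- ===== SOURCE B (Python) =====
-- def get_elements_for_line(l):
--     # symbols: every non-dot, non-digit character except in the final position
--     symbols = [(c, i) for i, c in enumerate(l[:-1]) if c != "." and not c.isnumeric()]
--     # numbers: each digit run delimited on the right by a non-digit character
--     numbers = []
--     start = 0
--     for end, c in enumerate(l):
--         if c.isnumeric():
--             continue
--         if end > start:
--             numbers.append((int(l[start:end]), start, end))
--         start = end + 1
--     return (numbers, symbols)
-- ===== Notes on version B (the rewrite author's own statement) =====
-- stated objective: idiomatic
-- what changed: Replaces A's single stateful scan (character-by-character digit buffer, start sentinel and duplicated flush branches) by a comprehension over enumerate(l[:-1]) for symbols and a delimiter-driven pass that slices out each digit run once when its right delimiter is reached.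
import Mathlib
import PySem

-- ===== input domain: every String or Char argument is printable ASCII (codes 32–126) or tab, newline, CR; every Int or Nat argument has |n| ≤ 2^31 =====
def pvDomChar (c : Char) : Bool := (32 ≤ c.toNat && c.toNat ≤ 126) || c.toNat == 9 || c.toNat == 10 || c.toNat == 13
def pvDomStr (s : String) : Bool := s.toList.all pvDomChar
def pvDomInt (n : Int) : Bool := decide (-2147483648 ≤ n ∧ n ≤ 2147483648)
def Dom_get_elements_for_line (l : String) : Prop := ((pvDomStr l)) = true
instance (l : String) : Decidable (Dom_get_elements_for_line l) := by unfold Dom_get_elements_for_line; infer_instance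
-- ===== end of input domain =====

-- B replaces A's single stateful scan (digit buffer + start sentinel + duplicated flush branches)
-- by a symbol comprehension over l[:-1] and a delimiter-driven pass slicing out each digit run; idiomatic, same cost.

-- int(num) where num is a nonempty string of digits at every call site, so ofChars? is always `some`; exact there
def pvIntOf (cs : List Char) : Int := (PySem.Int.ofChars? cs).getD 0

-- ===== PORT A =====
-- the for-loop of A: state (numbers, symbols, num, num_start); `.isnumeric()` ported as
-- PySem.Chars.isdigit (identical on the ASCII domain); num_start.getD 0 is only read when num ≠ [] (then it is `some`)
def pvALoop (n : Int) : List Char → Int → List (Int × Int × Int) → List (String × Int) → List Char → Option Int → (List (Int × Int × Int)) × (List (String × Int))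
  | [], _, nums, syms, _, _ => (nums, syms)
  | c :: rest, pos, nums, syms, num, numStart =>
    if c = '.' then
      if num ≠ [] then
        pvALoop n rest (pos + 1) (nums ++ [(pvIntOf num, numStart.getD 0, pos)]) syms [] none
      else
        pvALoop n rest (pos + 1) nums syms num numStart
    else if PySem.Chars.isdigit c then
      pvALoop n rest (pos + 1) nums syms (num ++ [c]) (if numStart = none then some pos else numStart)
    else
      let syms' := if pos < n - 1 then syms ++ [(String.singleton c, pos)] else syms
      if num ≠ [] then
        pvALoop n rest (pos + 1) (nums ++ [(pvIntOf num, numStart.getD 0, pos)]) syms' [] none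
      else
        pvALoop n rest (pos + 1) nums syms' num numStart

def get_elements_for_line (l : String) : (List (Int × Int × Int)) × (List (String × Int)) :=
  pvALoop (l.toList.length : Int) l.toList 0 [] [] [] none

-- ===== PORT B =====
-- the symbols comprehension of B over enumerate(l[:-1])
def pvBSyms : List Char → Int → List (String × Int)
  | [], _ => []
  | c :: rest, i =>
    if c ≠ '.' ∧ ¬ PySem.Chars.isdigit c then
      (String.singleton c, i) :: pvBSyms rest (i + 1)
    else
      pvBSyms rest (i + 1)

-- the numbers loop of B over enumerate(l): on each delimiter, slice out the digit run l[start:end]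
def pvBNumLoop (orig : List Char) : List Char → Int → Int → List (Int × Int × Int) → List (Int × Int × Int)
  | [], _, _, nums => nums
  | c :: rest, pos, start, nums =>
    if PySem.Chars.isdigit c then
      pvBNumLoop orig rest (pos + 1) start nums
    else
      pvBNumLoop orig rest (pos + 1) (pos + 1)
        (if start < pos then nums ++ [(pvIntOf (PySem.List.slice orig (some start) (some pos)), start, pos)] else nums)

def get_elements_for_line_alt (l : String) : (List (Int × Int × Int)) × (List (String × Int)) :=
  (pvBNumLoop l.toList l.toList 0 0 [], pvBSyms (PySem.List.slice l.toList none (some (-1))) 0)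

-- ===== PRECONDITION & SPEC =====
def Spec_get_elements_for_line (l : String) (out : (List (Int × Int × Int)) × (List (String × Int))) : Prop := out = get_elements_for_line_alt l
instance (l : String) (out : (List (Int × Int × Int)) × (List (String × Int))) : Decidable (Spec_get_elements_for_line l out) := by unfold Spec_get_elements_for_line; infer_instance

-- ===== CLAIM (what is proved, stated in full; the proofs are below) =====
def Claim_equal_get_elements_for_line : Prop := ∀ (l : String), Dom_get_elements_for_line l → Spec_get_elements_for_line l (get_elements_for_line l)


-- ===== LEMMAS AND PROOFS =====

lemma pvBNumLoop_nil (orig : List Char) (p s : Int) (nums : List (Int × Int × Int)) :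
    pvBNumLoop orig [] p s nums = nums := by rw [pvBNumLoop]

lemma pvBSyms_nil (i : Int) : pvBSyms [] i = [] := by rw [pvBSyms]

-- buffer of A at position pos with run start `start` is empty iff start = pos
lemma pvBufEmpty {orig : List Char} {pos start : Nat} (hpl : pos ≤ orig.length)
    (hle : start ≤ pos) : (orig.take pos).drop start = [] ↔ start = pos := by
  rw [← List.length_eq_zero_iff, List.length_drop, List.length_take]
  omega

-- A's buffer equals B's slice
lemma pvBufSlice (orig : List Char) (pos start : Nat) :
    PySem.List.slice orig (some (start : Int)) (some (pos : Int)) = (orig.take pos).drop start := by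
  rw [PySem.List.slice_natCast, List.drop_take]

-- extending the buffer by the character at pos
lemma pvBufExt {orig : List Char} {pos start : Nat} {c : Char} {rest : List Char}
    (h : orig.drop pos = c :: rest) (hle : start ≤ pos) :
    (orig.take (pos + 1)).drop start = (orig.take pos).drop start ++ [c] := by
  have hlt : pos < orig.length := by
    by_contra hc
    rw [List.drop_eq_nil_of_le (by omega)] at h
    simp at h
  have hg : orig[pos]? = some c := by
    have := congrArg (fun t : List Char => t[0]?) h
    simpa [List.getElem?_drop] using this
  rw [List.take_add_one, hg]
  exact List.drop_append_of_le_length (by simp; omega)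

-- one step of B's symbol pass, reading position pos of orig through dropLast
lemma pvSymStep {orig : List Char} {pos : Nat} {c : Char} {rest : List Char}
    (h : orig.drop pos = c :: rest) :
    pvBSyms (orig.dropLast.drop pos) (pos : Int)
      = (if pos + 1 < orig.length ∧ c ≠ '.' ∧ ¬ PySem.Chars.isdigit c
          then [(String.singleton c, (pos : Int))] else [])
        ++ pvBSyms (orig.dropLast.drop (pos + 1)) ((pos : Int) + 1) := by
  have hlt : pos < orig.length := by
    by_contra hc
    rw [List.drop_eq_nil_of_le (by omega)] at h
    simp at h
  have hdl : orig.dropLast.drop pos = (c :: rest).take (orig.length - 1 - pos) := by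
    rw [List.dropLast_eq_take, List.drop_take, h]
  by_cases hp : pos + 1 < orig.length
  · have h1 : orig.dropLast.drop pos = c :: rest.take (orig.length - 1 - (pos + 1)) := by
      rw [hdl]
      have : orig.length - 1 - pos = (orig.length - 1 - (pos + 1)) + 1 := by omega
      rw [this, List.take_succ_cons]
    have h2 : orig.dropLast.drop (pos + 1) = rest.take (orig.length - 1 - (pos + 1)) := by
      rw [List.dropLast_eq_take, List.drop_take]
      have : orig.drop (pos + 1) = rest := by
        have h2 := congrArg (List.drop 1) h
        simpa [List.drop_drop] using h2
      rw [this]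
    rw [h1, h2, pvBSyms]
    by_cases hcnd : c = '.' <;> by_cases hd : PySem.Chars.isdigit c <;> simp [hcnd, hd, hp]
  · have h1 : orig.dropLast.drop pos = [] := by
      rw [hdl]
      have : orig.length - 1 - pos = 0 := by omega
      simp [this]
    have h2 : orig.dropLast.drop (pos + 1) = [] :=
      List.drop_eq_nil_of_le (by simp; omega)
    rw [h1, h2, pvBSyms_nil, pvBSyms_nil]
    simp [hp]

-- the invariant: A's loop at position pos with buffer l[start:pos] equals B's two independent passes
set_option maxRecDepth 4096 in
lemma pvMain (orig : List Char) : ∀ (cs : List Char) (pos start : Nat)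
    (nums : List (Int × Int × Int)) (syms : List (String × Int)),
    orig.drop pos = cs → start ≤ pos →
    pvALoop (orig.length : Int) cs (pos : Int) nums syms ((orig.take pos).drop start)
        (if start = pos then none else some (start : Int))
      = (pvBNumLoop orig cs (pos : Int) (start : Int) nums,
         syms ++ pvBSyms (orig.dropLast.drop pos) (pos : Int)) := by
  intro cs
  induction cs with
  | nil =>
    intro pos start nums syms h hle
    have hdl : orig.dropLast.drop pos = [] := by
      have := List.drop_eq_nil_iff.mp h
      exact List.drop_eq_nil_of_le (by simp; omega)
    simp [pvALoop, pvBNumLoop_nil, hdl, pvBSyms_nil]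
  | cons c rest ih =>
    intro pos start nums syms h hle
    have hlt : pos < orig.length := by
      by_contra hc
      rw [List.drop_eq_nil_of_le (by omega)] at h
      simp at h
    have hrest : orig.drop (pos + 1) = rest := by
      have h2 := congrArg (List.drop 1) h
      simpa [List.drop_drop] using h2
    have hbufE : (orig.take pos).drop start = [] ↔ start = pos :=
      pvBufEmpty (by omega) hle
    have hbufX : (orig.take (pos + 1)).drop start = (orig.take pos).drop start ++ [c] :=
      pvBufExt h hle
    have hbufE' : (orig.take (pos + 1)).drop (pos + 1) = [] :=
      (pvBufEmpty (by omega) le_rfl).mpr rfl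
    have hsym := pvSymStep h
    have hcast : ((pos : Int) + 1) = ((pos + 1 : Nat) : Int) := by push_cast; ring
    have hsint : ((pos : Int) < (orig.length : Int) - 1) ↔ pos + 1 < orig.length := by omega
    by_cases hdot : c = '.'
    · subst hdot
      by_cases hsp : start = pos
      · -- empty buffer, '.': nothing happens
        subst hsp
        have hb : (orig.take start).drop start = [] := hbufE.mpr rfl
        have hA := ih (start + 1) (start + 1) nums syms hrest le_rfl
        rw [hbufE', if_pos rfl] at hA
        rw [pvALoop, hb]
        simp only [ne_eq, not_true_eq_false, if_false, reduceIte]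
        rw [hcast, hA, hsym, pvBNumLoop]
        simp only [(by decide : PySem.Chars.isdigit '.' = false), Bool.false_eq_true,
          if_false, lt_self_iff_false, ne_eq, not_true_eq_false, and_false, false_and,
          List.nil_append, hcast]
      · -- nonempty buffer, '.': flush the number
        have hb : (orig.take pos).drop start ≠ [] := fun hc => hsp (hbufE.mp hc)
        have hsl : (start : Int) < (pos : Int) := by
          exact_mod_cast Nat.lt_of_le_of_ne hle hsp
        have hA := ih (pos + 1) (pos + 1)
          (nums ++ [(pvIntOf ((orig.take pos).drop start), (start : Int), (pos : Int))])
          syms hrest le_rfl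
        rw [hbufE', if_pos rfl] at hA
        rw [pvALoop]
        simp only [hb, ne_eq, not_false_eq_true, if_true, hsp, if_false,
          Option.getD_some]
        rw [hcast, hA, hsym, pvBNumLoop]
        simp only [(by decide : PySem.Chars.isdigit '.' = false), Bool.false_eq_true,
          if_false, if_pos hsl, pvBufSlice, ne_eq, not_true_eq_false, and_false,
          false_and, List.nil_append, hcast]
    · by_cases hdig : PySem.Chars.isdigit c
      · -- digit: extend the buffer, keep (or set) the start marker
        have hA := ih (pos + 1) start nums syms hrest (by omega)
        rw [show (if start = pos + 1 then (none : Option Int) else some (start : Int))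
            = some (start : Int) by rw [if_neg]; omega] at hA
        rw [hbufX] at hA
        rw [pvALoop]
        simp only [hdot, if_false, hdig, if_true]
        by_cases hsp : start = pos
        · subst hsp
          rw [if_pos rfl]
          simp only [reduceIte]
          rw [hcast, hA, hsym, pvBNumLoop]
          simp only [hdig, if_true, not_true_eq_false, and_false, if_false,
            List.nil_append, hcast]
        · rw [if_neg hsp]
          simp only [reduceCtorEq, reduceIte]
          rw [hcast, hA, hsym, pvBNumLoop]
          simp only [hdig, if_true, not_true_eq_false, and_false, if_false,
            List.nil_append, hcast]
      · -- other symbol: record it unless at the last position; flush the buffer if nonempty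
        have hBnum : pvBNumLoop orig (c :: rest) (pos : Int) (start : Int) nums
            = pvBNumLoop orig rest ((pos + 1 : Nat) : Int) ((pos + 1 : Nat) : Int)
                (if (start : Int) < (pos : Int) then
                  nums ++ [(pvIntOf ((orig.take pos).drop start), (start : Int), (pos : Int))]
                 else nums) := by
          rw [pvBNumLoop]
          simp only [hdig, Bool.false_eq_true, if_false, pvBufSlice]
          simp only [hcast]
        by_cases hsp : start = pos
        · subst hsp
          have hb : (orig.take start).drop start = [] := hbufE.mpr rfl
          have hA := ih (start + 1) (start + 1) nums
            (if (start : Int) < (orig.length : Int) - 1 then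
              syms ++ [(String.singleton c, (start : Int))] else syms) hrest le_rfl
          rw [hbufE', if_pos rfl] at hA
          rw [pvALoop, hb]
          simp only [hdot, if_false, hdig, Bool.false_eq_true, ne_eq, not_true_eq_false,
            reduceIte]
          rw [hcast, hA, hBnum, hsym]
          have hirr : ¬ ((start : Int) < (start : Int)) := lt_irrefl _
          by_cases hp : start + 1 < orig.length
          · rw [if_pos (hsint.mpr hp), if_neg hirr, if_pos ⟨hp, hdot, hdig⟩]
            simp only [List.append_assoc, List.cons_append,
              List.nil_append, hcast]
          · rw [if_neg (fun hc => hp (hsint.mp hc)), if_neg hirr,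
              if_neg (fun hc => hp hc.1)]
            simp only [List.nil_append, hcast]
        · have hb : (orig.take pos).drop start ≠ [] := fun hc => hsp (hbufE.mp hc)
          have hsl : (start : Int) < (pos : Int) := by
            exact_mod_cast Nat.lt_of_le_of_ne hle hsp
          have hA := ih (pos + 1) (pos + 1)
            (nums ++ [(pvIntOf ((orig.take pos).drop start), (start : Int), (pos : Int))])
            (if (pos : Int) < (orig.length : Int) - 1 then
              syms ++ [(String.singleton c, (pos : Int))] else syms) hrest le_rfl
          rw [hbufE', if_pos rfl] at hA
          rw [pvALoop]
          simp only [hdot, if_false, hdig, Bool.false_eq_true, hb, ne_eq,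
            not_false_eq_true, reduceIte, hsp, Option.getD_some]
          rw [hcast, hA, hBnum, hsym, if_pos hsl]
          by_cases hp : pos + 1 < orig.length
          · rw [if_pos (hsint.mpr hp), if_pos ⟨hp, hdot, hdig⟩]
            simp only [List.append_assoc, List.cons_append,
              List.nil_append, hcast]
          · rw [if_neg (fun hc => hp (hsint.mp hc)), if_neg (fun hc => hp hc.1)]
            simp only [List.nil_append, hcast]

-- ===== VERDICT (by name: the statement is the Claim_ definition above) =====
theorem get_elements_for_line_spec : Claim_equal_get_elements_for_line := by
  intro l _
  unfold Spec_get_elements_for_line get_elements_for_line get_elements_for_line_alt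
  rw [PySem.List.slice_to_neg_one]
  have h := pvMain l.toList l.toList 0 0 [] [] (by simp) (le_refl 0)
  simpa using h
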